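-- pv_equiv track=rewrite | github.com/covelant-AI/blockjam-ai | src/services/analysis/deadtime.py | suppress_short_true_sequences
-- ===== SOURCE A (Python) =====
-- def suppress_short_true_sequences(data, min_true_time, time_per_value):
--     """
--     Replace sequences of True values shorter than min_true_length with False.
--
--     Parameters:
--     - data: list of bools
--     - min_true_time: int, minimum time of contiguous True values to keep
--     - time_per_value: int, number of seconds each data point represents
--
--     Returns:
--     - List of bools with short True sequences suppressed
--     """
--     modified_data = data.copy()
--     i = 0
--     min_true_length = min_true_time // time_per_value
--     while i < len(modified_data):
--         if modified_data[i]: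
--             start = i
--             while i < len(modified_data) and modified_data[i]:
--                 i += 1
--             end = i  # exclusive
--             if end - start < min_true_length:
--                 for j in range(start, end):
--                     modified_data[j] = False
--         else:
--             i += 1
--     return modified_data
-- ===== SOURCE B (Python) =====
-- def suppress_short_true_sequences(data, min_true_time, time_per_value):
--     min_true_length = min_true_time // time_per_value
--     n = len(data)
--     # backward pass: suffix[i] = length of the run of Trues starting at i
--     suffix = [0] * (n + 1)
--     for i in range(n - 1, -1, -1):
--         suffix[i] = suffix[i + 1] + 1 if data[i] else 0
--     # forward pass: carry the full length of the current True run, decide per element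
--     out = []
--     run = 0
--     for i in range(n):
--         if data[i]:
--             if run == 0:
--                 run = suffix[i]
--             out.append(run >= min_true_length)
--         else:
--             run = 0
--             out.append(False)
--     return out
-- ===== Notes on version B (the rewrite author's own statement) =====
-- stated objective: alternative
-- what changed: A's single index-based scan that finds each True run with a nested while and overwrites short runs in a copy is replaced by two staged passes: a backward pass building a suffix run-length array, then a forward pass that carries the full run length and decides each output element arithmetically (run >= threshold), with no run grouping or in-place mutation.
import Mathlib
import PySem

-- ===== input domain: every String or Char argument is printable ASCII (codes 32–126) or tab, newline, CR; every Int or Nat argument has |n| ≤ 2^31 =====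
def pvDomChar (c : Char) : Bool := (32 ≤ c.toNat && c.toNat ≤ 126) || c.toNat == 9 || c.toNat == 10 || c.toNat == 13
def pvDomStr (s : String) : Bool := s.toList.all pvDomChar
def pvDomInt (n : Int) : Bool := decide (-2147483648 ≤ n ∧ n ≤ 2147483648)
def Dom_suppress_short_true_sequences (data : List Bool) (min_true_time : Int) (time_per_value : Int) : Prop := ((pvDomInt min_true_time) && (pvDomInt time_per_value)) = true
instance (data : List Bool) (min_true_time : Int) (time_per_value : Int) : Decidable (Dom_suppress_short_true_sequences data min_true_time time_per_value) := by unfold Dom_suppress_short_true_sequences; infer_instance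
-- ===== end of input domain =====

-- B replaces A's nested-while run scan over a mutated copy by two staged passes (a suffix
-- run-length array, then a forward carry deciding each element arithmetically); objective:
-- alternative. Return-value equivalence only (A mutates only its private copy).


-- ===== PORT A =====
-- A's outer while loop: on a True, the inner while scans to the run's end (takeWhile/dropWhile),
-- then the run is overwritten with False iff it is shorter than min_true_length; on a False, i += 1.
def pvGoA (m : Int) : List Bool → List Bool
  | [] => []
  | b :: rest =>
    if b then
      (if (((rest.takeWhile (fun x => x)).length + 1 : Nat) : Int) < m then
        List.replicate ((rest.takeWhile (fun x => x)).length + 1) false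
       else b :: rest.takeWhile (fun x => x)) ++ pvGoA m (rest.dropWhile (fun x => x))
    else
      b :: pvGoA m rest
termination_by l => l.length
decreasing_by
  · simpa using Nat.lt_succ_of_le (List.length_dropWhile_le _ _)
  · simp

def suppress_short_true_sequences (data : List Bool) (min_true_time : Int) (time_per_value : Int) : List Bool :=
  pvGoA (PySem.Int.floordiv min_true_time time_per_value) data

-- ===== PORT B =====
-- backward pass of Source B: suffix[i] = suffix[i+1] + 1 if data[i] else 0 (suffix[n] = 0)
def pvSuffix : List Bool → List Nat
  | [] => []
  | b :: rest =>
    (if b then (pvSuffix rest).headD 0 + 1 else 0) :: pvSuffix rest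

-- forward pass of Source B: carry `run` (full length of the current True run), emit run >= m per element
def pvGoB (m : Int) : List Bool → List Nat → Nat → List Bool
  | [], _, _ => []
  | true :: xs, s :: ss, run =>
    let r := if run = 0 then s else run
    decide (m ≤ ((r : Nat) : Int)) :: pvGoB m xs ss r
  | false :: xs, _ :: ss, _ => false :: pvGoB m xs ss 0
  | _ :: _, [], _ => []   -- unreachable: the suffix list always has the data's length

def suppress_short_true_sequences_alt (data : List Bool) (min_true_time : Int) (time_per_value : Int) : List Bool :=
  pvGoB (PySem.Int.floordiv min_true_time time_per_value) data (pvSuffix data) 0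

-- ===== PRECONDITION & SPEC =====
-- Pre_ excludes exactly time_per_value = 0, where A (and B) raise ZeroDivisionError on '//'.
def Pre_suppress_short_true_sequences (data : List Bool) (min_true_time : Int) (time_per_value : Int) : Prop := time_per_value ≠ 0
instance (data : List Bool) (min_true_time : Int) (time_per_value : Int) : Decidable (Pre_suppress_short_true_sequences data min_true_time time_per_value) := by unfold Pre_suppress_short_true_sequences; infer_instance
def pvWitness_suppress_short_true_sequences : List Bool × Int × Int := ([true, true, false, true], 4, 2)

def Spec_suppress_short_true_sequences (data : List Bool) (min_true_time : Int) (time_per_value : Int) (out : List Bool) : Prop := out = suppress_short_true_sequences_alt data min_true_time time_per_value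
instance (data : List Bool) (min_true_time : Int) (time_per_value : Int) (out : List Bool) : Decidable (Spec_suppress_short_true_sequences data min_true_time time_per_value out) := by unfold Spec_suppress_short_true_sequences; infer_instance

-- ===== CLAIM (what is proved, stated in full; the proofs are below) =====
def Claim_equal_suppress_short_true_sequences : Prop := ∀ (data : List Bool) (min_true_time : Int) (time_per_value : Int), Dom_suppress_short_true_sequences data min_true_time time_per_value → Pre_suppress_short_true_sequences data min_true_time time_per_value → Spec_suppress_short_true_sequences data min_true_time time_per_value (suppress_short_true_sequences data min_true_time time_per_value)

-- ===== LEMMAS AND PROOFS =====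

-- [j, j-1, …, 1]: the suffix values inside a True run of length j
def pvDesc : Nat → List Nat
  | 0 => []
  | j + 1 => (j + 1) :: pvDesc j

theorem pvTakeWhile_eq_replicate (x : Bool) (xs : List Bool) :
    xs.takeWhile (· == x) = List.replicate (xs.takeWhile (· == x)).length x := by
  rw [List.eq_replicate_iff]
  refine ⟨rfl, fun b hb => ?_⟩
  simpa using List.mem_takeWhile_imp hb

theorem pvSuffix_head_zero (rest : List Bool) (h : rest.headD false = false) :
    (pvSuffix rest).headD 0 = 0 := by
  cases rest with
  | nil => simp [pvSuffix]
  | cons b t => simp at h; simp [pvSuffix, h]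

theorem pvSuffix_true_block (j : Nat) (rest : List Bool) (h : rest.headD false = false) :
    pvSuffix (List.replicate j true ++ rest) = pvDesc j ++ pvSuffix rest := by
  induction j with
  | zero => simp [pvDesc]
  | succ j ih =>
    rw [List.replicate_succ, List.cons_append, pvSuffix, ih, pvDesc, List.cons_append]
    congr 1
    rw [if_pos rfl]
    cases j with
    | zero => rw [pvDesc, List.nil_append, pvSuffix_head_zero rest h]
    | succ k => rw [pvDesc, List.cons_append]; rfl

theorem pvGoB_true_block (m : Int) (j : Nat) (rest : List Bool) (r : Nat) (hr : r ≠ 0) :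
    pvGoB m (List.replicate j true ++ rest) (pvDesc j ++ pvSuffix rest) r =
      List.replicate j (decide (m ≤ ((r : Nat) : Int))) ++ pvGoB m rest (pvSuffix rest) r := by
  induction j with
  | zero => simp [pvDesc]
  | succ j ih =>
    rw [List.replicate_succ, pvDesc, List.cons_append, List.cons_append, pvGoB]
    simp only [if_neg hr, List.replicate_succ, List.cons_append, ih]

theorem pvGoB_false_start (m : Int) (rest : List Bool) (r : Nat)
    (h : rest.headD false = false) :
    pvGoB m rest (pvSuffix rest) r = pvGoB m rest (pvSuffix rest) 0 := by
  cases rest with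
  | nil => simp [pvGoB]
  | cons b t => simp at h; subst h; simp [pvGoB, pvSuffix]

theorem pvKey (m : Int) (l : List Bool) :
    pvGoA m l = pvGoB m l (pvSuffix l) 0 := by
  induction h : l.length using Nat.strong_induction_on generalizing l with
  | _ n ih =>
    match l with
    | [] => simp [pvGoA, pvGoB]
    | x :: xs =>
      have hdrop : (xs.dropWhile (· == x)).length < n := by
        have hn : xs.length + 1 = n := by simpa using h
        have := List.length_dropWhile_le (· == x) xs
        omega
      have htw : xs.takeWhile (· == x) = List.replicate (xs.takeWhile (· == x)).length x :=
        pvTakeWhile_eq_replicate x xs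
      cases x with
      | false =>
        have hxs : xs.length < n := by simp at h; omega
        rw [pvGoA, if_neg (by simp), pvSuffix]
        simp only [pvGoB]
        exact congrArg (false :: ·) (ih _ hxs _ rfl)
      | true =>
        have hpred : (fun b : Bool => b == true) = (fun b : Bool => b) := by
          funext b; simp
        rw [hpred] at hdrop htw
        set k := (xs.takeWhile (fun x => x)).length with hk
        set rest := xs.dropWhile (fun x => x) with hrest
        have hresthd : rest.headD false = false := by
          cases hr : rest with
          | nil => rfl
          | cons b t =>
            have := List.head?_dropWhile_not (fun x => x) xs
            rw [← hrest, hr] at this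
            simp at this
            simp [this]
        have hsplit : (true :: xs) = List.replicate (k + 1) true ++ rest := by
          rw [List.replicate_succ, List.cons_append]
          refine congrArg (true :: ·) ?_
          conv_lhs => rw [← List.takeWhile_append_dropWhile (p := (fun x => x)) (l := xs)]
          rw [htw]
        rw [pvGoA, if_pos rfl]
        conv_rhs => rw [hsplit, pvSuffix_true_block _ _ hresthd]
        have hstep : pvGoB m (List.replicate (k + 1) true ++ rest)
            (pvDesc (k + 1) ++ pvSuffix rest) 0 =
            List.replicate (k + 1) (decide (m ≤ ((k + 1 : Nat) : Int))) ++
              pvGoB m rest (pvSuffix rest) 0 := by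
          rw [List.replicate_succ, pvDesc, List.cons_append, List.cons_append]
          simp only [pvGoB, List.replicate_succ, List.cons_append]
          norm_num
          rw [pvGoB_true_block m k rest (k + 1) (Nat.succ_ne_zero k),
            pvGoB_false_start m rest (k + 1) hresthd]
          norm_cast
        rw [hstep, ← ih _ hdrop _ rfl]
        congr 1
        split_ifs with h1
        · have : decide (m ≤ ((k + 1 : Nat) : Int)) = false := by
            simp; push_cast at h1 ⊢; omega
          rw [this]
        · have : decide (m ≤ ((k + 1 : Nat) : Int)) = true := by
            simp; push_cast at h1 ⊢; omega
          rw [this, htw, List.replicate_succ]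

-- ===== VERDICT (by name: the statement is the Claim_ definition above) =====
theorem suppress_short_true_sequences_spec : Claim_equal_suppress_short_true_sequences := by
  intro data mtt tpv _ _
  unfold Spec_suppress_short_true_sequences suppress_short_true_sequences suppress_short_true_sequences_alt
  exact pvKey _ data
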